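-- pv_equiv track=rewrite | github.com/ottojonas/utility-scripts | schoolCodeExercises/sodaBuyingRecursiveAndIterative/iterative.py | bottleRecycle
-- ===== SOURCE A (Python) =====
-- def bottleRecycle(money, emptyBottles=0):
--     totalBottles = 0
--     while money > 0 or emptyBottles >= 3:
--         if money > 0:
--             money -= 1
--             emptyBottles += 1
--             totalBottles += 1
--         elif emptyBottles >= 3:
--             emptyBottles -= 2
--             totalBottles += 1
--     return totalBottles
-- ===== SOURCE B (Python) =====
-- def bottleRecycle(money, emptyBottles=0):
--     bought = max(money, 0)
--     empties = emptyBottles + bought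
--     trades = (empties - 1) // 2 if empties >= 3 else 0
--     return bought + trades
-- ===== Notes on version B (the rewrite author's own statement) =====
-- stated objective: faster
-- what changed: Replaced the one-soda-at-a-time simulation loop with a closed-form computation: buy max(money,0) sodas, then the number of 2-empties-for-a-soda trades is (empties-1)//2 once empties >= 3.
import Mathlib
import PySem

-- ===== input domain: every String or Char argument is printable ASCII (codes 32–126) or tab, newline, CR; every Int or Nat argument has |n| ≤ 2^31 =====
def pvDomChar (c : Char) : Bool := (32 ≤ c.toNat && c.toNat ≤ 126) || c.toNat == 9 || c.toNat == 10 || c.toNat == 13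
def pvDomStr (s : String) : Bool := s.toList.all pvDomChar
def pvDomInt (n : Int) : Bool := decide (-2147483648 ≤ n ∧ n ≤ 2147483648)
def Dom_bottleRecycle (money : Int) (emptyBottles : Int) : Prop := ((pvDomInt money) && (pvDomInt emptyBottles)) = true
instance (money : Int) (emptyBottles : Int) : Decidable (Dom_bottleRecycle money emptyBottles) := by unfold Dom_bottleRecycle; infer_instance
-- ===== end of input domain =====

-- B replaces A's one-soda-per-iteration simulation by an O(1) closed-form count (faster, asymptotic).


-- ===== PORT A =====
-- literal transliteration of A's while loop; state = (money, emptyBottles, totalBottles)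
def bottleRecycleLoop (money : Int) (emptyBottles : Int) (totalBottles : Int) : Int :=
  if money > 0 ∨ emptyBottles ≥ 3 then
    if money > 0 then
      bottleRecycleLoop (money - 1) (emptyBottles + 1) (totalBottles + 1)
    else
      bottleRecycleLoop money (emptyBottles - 2) (totalBottles + 1)
  else totalBottles
termination_by 2 * money.toNat + emptyBottles.toNat
decreasing_by
  · omega
  · omega

def bottleRecycle (money : Int) (emptyBottles : Int) : Int :=
  bottleRecycleLoop money emptyBottles 0

-- ===== PORT B =====
def bottleRecycle_alt (money : Int) (emptyBottles : Int) : Int :=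
  let bought := max money 0
  let empties := emptyBottles + bought
  let trades := if empties ≥ 3 then PySem.Int.floordiv (empties - 1) 2 else 0
  bought + trades

-- ===== PRECONDITION & SPEC =====
def Spec_bottleRecycle (money : Int) (emptyBottles : Int) (out : Int) : Prop := out = bottleRecycle_alt money emptyBottles
instance (money : Int) (emptyBottles : Int) (out : Int) : Decidable (Spec_bottleRecycle money emptyBottles out) := by unfold Spec_bottleRecycle; infer_instance

-- ===== CLAIM (what is proved, stated in full; the proofs are below) =====
def Claim_equal_bottleRecycle : Prop := ∀ (money : Int) (emptyBottles : Int), Dom_bottleRecycle money emptyBottles → Spec_bottleRecycle money emptyBottles (bottleRecycle money emptyBottles)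

-- ===== LEMMAS AND PROOFS =====

-- drain phase: once money ≤ 0, only the trade branch can run
theorem bottleRecycleLoop_drain (n : Nat) : ∀ (e money t : Int), e.toNat ≤ n → money ≤ 0 →
    bottleRecycleLoop money e t = t + (if e ≥ 3 then (e - 1) / 2 else 0) := by
  induction n with
  | zero =>
    intro e money t hn hm
    rw [bottleRecycleLoop, if_neg (by omega)]
    rw [if_neg (by omega : ¬ e ≥ 3)]
    omega
  | succ k ih =>
    intro e money t hn hm
    by_cases he : e ≥ 3
    · rw [bottleRecycleLoop, if_pos (by omega), if_neg (by omega)]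
      rw [ih (e - 2) money (t + 1) (by omega) hm]
      rw [if_pos he]
      split <;> omega
    · rw [bottleRecycleLoop, if_neg (by omega), if_neg he]
      omega

-- buy phase: while money > 0, each step converts one unit of money into one soda and one empty
theorem bottleRecycleLoop_buy (n : Nat) : ∀ (money e t : Int), money = (n : Int) →
    bottleRecycleLoop money e t = bottleRecycleLoop 0 (e + money) (t + money) := by
  induction n with
  | zero => intro money e t h; subst h; simp
  | succ k ih =>
    intro money e t h
    rw [bottleRecycleLoop]
    have h1 : (money > 0 ∨ e ≥ 3) := by omega
    have h2 : money > 0 := by omega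
    rw [if_pos h1, if_pos h2]
    rw [ih (money - 1) (e + 1) (t + 1) (by omega)]
    ring_nf

-- ===== VERDICT (by name: the statement is the Claim_ definition above) =====
theorem bottleRecycle_spec : Claim_equal_bottleRecycle := by
  intro money e _
  unfold Spec_bottleRecycle bottleRecycle bottleRecycle_alt
  have hfd : ∀ a : Int, PySem.Int.floordiv a 2 = a / 2 :=
    fun a => PySem.Int.floordiv_eq_ediv_of_pos (by omega)
  by_cases hm : money > 0
  · obtain ⟨n, hn⟩ : ∃ n : Nat, money = (n : Int) := ⟨money.toNat, by omega⟩
    rw [bottleRecycleLoop_buy n money e 0 hn,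
        bottleRecycleLoop_drain (e + money).toNat (e + money) 0 (0 + money) (by omega) (by omega)]
    have hmax : max money 0 = money := by omega
    simp only [hmax, hfd]
    split <;> omega
  · rw [bottleRecycleLoop_drain e.toNat e money 0 (by omega) (by omega)]
    have hmax : max money 0 = 0 := by omega
    simp only [hmax, hfd, add_zero]
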